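-- pv_equiv track=rewrite | github.com/pypi-data/pypi-mirror-399 | packages/theauditor/theauditor-2.0.3rc1-py3-none-any.whl/theauditor/commands/graph.py | _normalize_path_filter
-- ===== SOURCE A (Python) =====
-- def _normalize_path_filter(path_filter: tuple, extra_paths: tuple = ()) -> str | None:
--     """Normalize path filter - handle shell expansion and convert wildcards to SQL LIKE.
--
--     When shell expands 'frontend/*' into multiple paths, we extract the common prefix.
--     Converts glob wildcards (*, **) to SQL LIKE wildcards (%).
--     """
--     # Combine --path values and any shell-expanded extra arguments
--     all_paths = list(path_filter) + list(extra_paths)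
--     if not all_paths:
--         return None
--
--     if len(all_paths) == 1:
--         path = all_paths[0]
--     else:
--         # Shell expanded the glob - extract common prefix
--         paths = [p.replace("\\", "/") for p in all_paths]
--         if paths:
--             prefix_parts = paths[0].split("/")
--             common_parts = []
--             for i, part in enumerate(prefix_parts):
--                 if all(p.split("/")[i] == part if len(p.split("/")) > i else False for p in paths):
--                     common_parts.append(part)
--                 else:
--                     break
--             path = "/".join(common_parts) + "/" if common_parts else ""
--         else:
--             return None
--
--     # Normalize path separators and wildcards
--     path = path.replace("\\", "/")
--     path = path.replace("**", "%").replace("*", "%").replace("?", "_")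
--     if not path.endswith("%") and not path.endswith("/"):
--         path += "%"
--     elif path.endswith("/"):
--         path += "%"
--     return path
-- ===== SOURCE B (Python) =====
-- def _common2(a, b):
--     out = []
--     for x, y in zip(a, b):
--         if x != y:
--             break
--         out.append(x)
--     return out
--
--
-- def _normalize_path_filter(path_filter: tuple, extra_paths: tuple = ()) -> str | None:
--     all_paths = list(path_filter) + list(extra_paths)
--     if not all_paths:
--         return None
--     if len(all_paths) == 1:
--         path = all_paths[0]
--     else:
--         # fold a pairwise common-segment-prefix over all paths
--         splits = [p.replace("\\", "/").split("/") for p in all_paths]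
--         common = splits[0]
--         for s in splits[1:]:
--             common = _common2(common, s)
--         path = "/".join(common) + "/" if common else ""
--     path = path.replace("\\", "/").replace("**", "%").replace("*", "%").replace("?", "_")
--     if not path.endswith("%"):
--         path += "%"
--     return path
-- ===== Notes on version B (the rewrite author's own statement) =====
-- stated objective: simpler
-- what changed: The multi-path common-prefix extraction is a fold of a pairwise common-segment-prefix over pre-split paths instead of A's indexed column scan that re-splits every path at every index, and A's three-way trailing '%'/'/' test collapses to a single endswith('%') check.
import Mathlib
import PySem

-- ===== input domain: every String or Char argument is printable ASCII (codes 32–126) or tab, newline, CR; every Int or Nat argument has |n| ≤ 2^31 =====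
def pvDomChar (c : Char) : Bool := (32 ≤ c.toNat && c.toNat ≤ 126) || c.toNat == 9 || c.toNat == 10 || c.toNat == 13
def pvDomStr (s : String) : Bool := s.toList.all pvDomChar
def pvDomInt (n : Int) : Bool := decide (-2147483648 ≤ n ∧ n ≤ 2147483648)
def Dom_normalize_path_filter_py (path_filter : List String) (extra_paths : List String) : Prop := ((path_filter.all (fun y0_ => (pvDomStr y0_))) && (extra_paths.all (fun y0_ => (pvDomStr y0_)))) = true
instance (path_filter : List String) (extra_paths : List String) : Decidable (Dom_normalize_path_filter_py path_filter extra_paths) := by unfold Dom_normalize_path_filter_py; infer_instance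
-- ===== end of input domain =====

-- B replaces A's row-major indexed prefix scan by a fold of a pairwise common-segment-prefix
-- over the split paths, and collapses A's three-way trailing test to a single endswith check (objective: simpler).

-- ===== PORT A =====
-- p.split("/") with nonempty separator: Str.split? is some here (none only for sep = "")
def pySplit (p : String) : List String :=
  match PySem.Str.split? p "/" with
  | some r => r
  | none => []

-- A's inner loop: for i, part in enumerate(prefix_parts): if all(...): append else break.
-- p.split("/")[i] is guarded by len(p.split("/")) > i, so getD is exact there.
def aLoop (paths : List String) (parts : List String) (i : Nat) : List String :=
  match parts with
  | [] => []
  | part :: rest =>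
    if paths.all (fun p =>
        if i < (pySplit p).length
        then (pySplit p).getD i "" == part
        else false)
    then part :: aLoop paths rest (i + 1)
    else []

def aFinal (path0 : String) : String :=
  let path1 := PySem.Str.replace path0 "\\" "/"
  let path := PySem.Str.replace (PySem.Str.replace (PySem.Str.replace path1 "**" "%") "*" "%") "?" "_"
  if !(PySem.Str.endswith path "%") && !(PySem.Str.endswith path "/") then path ++ "%"
  else if PySem.Str.endswith path "/" then path ++ "%"
  else path

def normalize_path_filter_py (path_filter : List String) (extra_paths : List String) : Option String :=
  let all_paths := path_filter ++ extra_paths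
  if all_paths = [] then none
  else
    let pathOpt : Option String :=
      if all_paths.length = 1 then some (all_paths.headD "")
      else
        let paths := all_paths.map (fun p => PySem.Str.replace p "\\" "/")
        if paths = [] then none
        else
          let prefix_parts := pySplit (paths.headD "")
          let common_parts := aLoop paths prefix_parts 0
          some (if common_parts ≠ [] then PySem.Str.join "/" common_parts ++ "/" else "")
    pathOpt.map aFinal

-- ===== PORT B =====
def common2 (a b : List String) : List String :=
  match a, b with
  | x :: xs, y :: ys => if x == y then x :: common2 xs ys else []
  | _, _ => []

def bFinal (path0 : String) : String :=
  let path := PySem.Str.replace (PySem.Str.replace (PySem.Str.replace (PySem.Str.replace path0 "\\" "/") "**" "%") "*" "%") "?" "_"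
  if PySem.Str.endswith path "%" then path else path ++ "%"

def normalize_path_filter_py_alt (path_filter : List String) (extra_paths : List String) : Option String :=
  let all_paths := path_filter ++ extra_paths
  if all_paths = [] then none
  else
    let path :=
      if all_paths.length = 1 then all_paths.headD ""
      else
        let splits := all_paths.map (fun p => pySplit (PySem.Str.replace p "\\" "/"))
        let common := splits.tail.foldl common2 (splits.headD [])
        if common ≠ [] then PySem.Str.join "/" common ++ "/" else ""
    some (bFinal path)

-- ===== PRECONDITION & SPEC =====
def Spec_normalize_path_filter_py (path_filter : List String) (extra_paths : List String) (out : Option String) : Prop := out = normalize_path_filter_py_alt path_filter extra_paths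
instance (path_filter : List String) (extra_paths : List String) (out : Option String) : Decidable (Spec_normalize_path_filter_py path_filter extra_paths out) := by unfold Spec_normalize_path_filter_py; infer_instance

-- ===== CLAIM (what is proved, stated in full; the proofs are below) =====
def Claim_equal_normalize_path_filter_py : Prop := ∀ (path_filter : List String) (extra_paths : List String), Dom_normalize_path_filter_py path_filter extra_paths → Spec_normalize_path_filter_py path_filter extra_paths (normalize_path_filter_py path_filter extra_paths)

-- ===== LEMMAS AND PROOFS =====

-- column-wise common prefix: reference shape both ports are reduced to
def colPrefix (m0 : List String) (ms : List (List String)) : List String :=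
  match m0 with
  | [] => []
  | x :: xs =>
    if ms.all (fun m => m.head? == some x) then x :: colPrefix xs (ms.map List.tail) else []

theorem ends_excl (s : String) (h : PySem.Str.endswith s "%" = true) :
    PySem.Str.endswith s "/" = false := by
  by_contra hc
  rw [Bool.not_eq_false] at hc
  simp only [PySem.Str.endswith_eq] at h hc
  rw [PySem.Chars.endswith_iff] at h hc
  obtain ⟨t1, h1⟩ := h
  obtain ⟨t2, h2⟩ := hc
  have : ("%".toList).getLast? = ("/".toList).getLast? := by
    have e1 : s.toList.getLast? = some '%' := by
      rw [← h1]; simp [List.getLast?_append]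
    have e2 : s.toList.getLast? = some '/' := by
      rw [← h2]; simp [List.getLast?_append]
    simp [e1] at e2
  simp at this

theorem tail_eq (p : String) :
    (if !(PySem.Str.endswith p "%") && !(PySem.Str.endswith p "/") then p ++ "%"
     else if PySem.Str.endswith p "/" then p ++ "%" else p)
    = (if PySem.Str.endswith p "%" then p else p ++ "%") := by
  cases h1 : PySem.Str.endswith p "%" with
  | true =>
    have h2 := ends_excl p h1
    simp only [PySem.Str.endswith_eq] at h2
    simp at h2
    simp [h2]
  | false => cases h2 : PySem.Str.endswith p "/" <;> simp

theorem final_eq (s : String) : aFinal s = bFinal s := by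
  unfold aFinal bFinal
  exact tail_eq _

theorem aLoop_eq_colPrefix (qs : List String) (parts : List String) (i : Nat) :
    aLoop qs parts i = colPrefix parts ((qs.map (fun p => pySplit p)).map (List.drop i)) := by
  induction parts generalizing i with
  | nil => simp [aLoop, colPrefix]
  | cons part rest ih =>
    rw [aLoop, colPrefix]
    have hc : ((qs.map (fun p => pySplit p)).map (List.drop i)).all
        (fun m => m.head? == some part)
      = qs.all (fun p =>
          if i < (pySplit p).length
          then (pySplit p).getD i "" == part
          else false) := by
      simp only [List.all_map, Function.comp_def]
      congr 1
      funext p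
      rw [List.head?_drop]
      by_cases hl : i < (pySplit p).length
      · rw [List.getElem?_eq_getElem hl]
        simp [hl, List.getD]
      · rw [List.getElem?_eq_none (by omega)]
        simp [hl]
    rw [hc]
    split
    · have hmap : List.map List.tail (List.map (List.drop i) (List.map (fun p => pySplit p) qs))
          = List.map (List.drop (i + 1)) (List.map (fun p => pySplit p) qs) := by
        simp [List.map_map, Function.comp_def, List.tail_drop]
      rw [hmap, ih (i + 1)]
    · rfl

theorem colPrefix_self (m0 : List String) (ms : List (List String)) :
    colPrefix m0 (m0 :: ms) = colPrefix m0 ms := by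
  induction m0 generalizing ms with
  | nil => simp [colPrefix]
  | cons x xs ih =>
    rw [colPrefix, colPrefix]
    simp only [List.all_cons, List.head?_cons, List.map_cons, List.tail_cons,
      beq_self_eq_true, Bool.true_and]
    split
    · rw [ih]
    · rfl

theorem colPrefix_nil (m0 : List String) : colPrefix m0 [] = m0 := by
  induction m0 with
  | nil => rfl
  | cons x xs ih => rw [colPrefix]; simp [ih]

theorem colPrefix_cons (m0 m : List String) (ms : List (List String)) :
    colPrefix m0 (m :: ms) = colPrefix (common2 m0 m) ms := by
  induction m0 generalizing m ms with
  | nil => simp [colPrefix, common2]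
  | cons x xs ih =>
    cases m with
    | nil =>
      rw [colPrefix]
      simp [common2, colPrefix]
    | cons y ys =>
      rw [colPrefix, common2]
      by_cases hxy : x == y
      · have hx : x = y := eq_of_beq hxy
        subst hx
        simp only [List.all_cons, List.head?_cons, beq_self_eq_true, Bool.true_and,
          List.map_cons, List.tail_cons, if_true]
        rw [colPrefix]
        split
        · rw [ih]
        · rfl
      · have hyx : ((y :: ys).head? == some x) = false := by
          have hne : ¬ y = x := fun h => hxy (by simp [h])
          simp [hne]
        rw [if_neg hxy]
        simp only [List.all_cons, hyx, Bool.false_and]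
        rfl

theorem foldl_common2_eq (ms : List (List String)) (m0 : List String) :
    ms.foldl common2 m0 = colPrefix m0 ms := by
  induction ms generalizing m0 with
  | nil => simp [colPrefix_nil]
  | cons m ms ih => rw [List.foldl_cons, ih, colPrefix_cons]

-- ===== VERDICT (by name: the statement is the Claim_ definition above) =====
theorem normalize_path_filter_py_spec : Claim_equal_normalize_path_filter_py := by
  intro pf ep _
  unfold Spec_normalize_path_filter_py
  simp only [normalize_path_filter_py, normalize_path_filter_py_alt]
  generalize pf ++ ep = l
  cases l with
  | nil => simp
  | cons p rest =>
    rw [if_neg (List.cons_ne_nil p rest), if_neg (List.cons_ne_nil p rest)]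
    cases rest with
    | nil => simp [final_eq]
    | cons q rest =>
      have hlen : (p :: q :: rest).length ≠ 1 := by simp
      rw [if_neg hlen, if_neg hlen, if_neg (by simp : ¬ List.map (fun p => PySem.Str.replace p "\\" "/") (p :: q :: rest) = [])]
      simp only [Option.map_some, List.map_cons, List.headD_cons, List.tail_cons]
      have hcomm :
          aLoop (PySem.Str.replace p "\\" "/" :: PySem.Str.replace q "\\" "/" ::
              List.map (fun p => PySem.Str.replace p "\\" "/") rest)
            (pySplit (PySem.Str.replace p "\\" "/")) 0
          = List.foldl common2 (pySplit (PySem.Str.replace p "\\" "/"))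
              (pySplit (PySem.Str.replace q "\\" "/") ::
                List.map (fun p => pySplit (PySem.Str.replace p "\\" "/")) rest) := by
        rw [foldl_common2_eq, aLoop_eq_colPrefix]
        simp only [List.map_cons, List.drop_zero, List.map_map, Function.comp_def]
        exact colPrefix_self _ _
      rw [hcomm, final_eq]
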